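-- pv_equiv track=rewrite | github.com/shreyysk/GoCubes | utils/helpers.py | calculate_move_metrics
-- ===== SOURCE A (Python) =====
-- from typing import List, Dict
--
-- def calculate_move_metrics(moves: List[str]) -> Dict[str, int]:
--     """
--     Calculate various metrics for a move sequence
--
--     Args:
--         moves: List of move notations
--
--     Returns:
--         Dictionary with metrics (htm, qtm, stm, rotations)
--     """
--     metrics = {
--         'htm': 0,      # Half Turn Metric
--         'qtm': 0,      # Quarter Turn Metric
--         'stm': 0,      # Slice Turn Metric
--         'rotations': 0  # Cube rotations
--     }
--
--     for move in moves:
--         if not move: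
--             continue
--
--         # HTM: Every move counts as 1
--         metrics['htm'] += 1
--
--         # Parse move
--         face = move[0].upper()
--
--         # QTM: Count quarter turns
--         if move.endswith('2'):
--             metrics['qtm'] += 2
--         else:
--             metrics['qtm'] += 1
--
--         # STM: Slice moves count differently
--         if face in 'MES':
--             metrics['stm'] += 2
--         elif face.islower():  # Wide moves
--             metrics['stm'] += 1
--         else:
--             metrics['stm'] += 1
--
--         # Count rotations
--         if face in 'XYZ':
--             metrics['rotations'] += 1
--
--     return metrics
-- ===== SOURCE B (Python) =====
-- def calculate_move_metrics(moves):
--     # Count boolean events, then derive qtm/stm by arithmetic identities: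
--     # qtm = htm + (# moves ending in '2'), stm = htm + (# slice moves).
--     def count(pred):
--         return sum(1 for m in moves if pred(m))
--     htm = count(bool)
--     doubles = count(lambda m: m.endswith('2'))
--     slices = count(lambda m: m and m[0].upper() in 'MES')
--     rotations = count(lambda m: m and m[0].upper() in 'XYZ')
--     return {'htm': htm, 'qtm': htm + doubles, 'stm': htm + slices,
--             'rotations': rotations}
-- ===== Notes on version B (the rewrite author's own statement) =====
-- stated objective: alternative
-- what changed: Instead of A's fused loop summing per-move weights (1 or 2) into four dict counters, B counts four boolean events (non-empty, ends-in-'2', slice face, rotation face) and derives qtm and stm by the arithmetic identities qtm = htm + #doubles and stm = htm + #slices.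
import Mathlib
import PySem

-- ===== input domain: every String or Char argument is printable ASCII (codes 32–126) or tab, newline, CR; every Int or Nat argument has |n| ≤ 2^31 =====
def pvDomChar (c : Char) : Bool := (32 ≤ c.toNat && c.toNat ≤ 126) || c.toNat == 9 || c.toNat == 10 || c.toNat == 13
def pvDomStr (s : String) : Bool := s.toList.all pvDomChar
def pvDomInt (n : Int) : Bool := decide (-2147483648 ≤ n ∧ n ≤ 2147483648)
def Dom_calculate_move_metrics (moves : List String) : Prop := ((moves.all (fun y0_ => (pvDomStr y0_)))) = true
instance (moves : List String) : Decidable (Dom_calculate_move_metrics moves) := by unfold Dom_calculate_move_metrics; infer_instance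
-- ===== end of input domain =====

-- B counts four boolean events and derives qtm/stm by the identities qtm = htm + #doubles,
-- stm = htm + #slices, instead of A's fused loop summing per-move weights into dict counters.
-- ===== PORT A =====
-- one loop iteration of A: updates the four counters (htm, qtm, stm, rotations)
def cmmStep (s : Int × Int × Int × Int) (move : String) : Int × Int × Int × Int :=
  match move.toList with
  | [] => s            -- `if not move: continue`
  | c :: _ =>
    -- face = move[0].upper(); `face in 'MES'` on a 1-char string is char membership (exact here)
    let face := PySem.Chars.upperChar c
    let htm := s.1 + 1
    let qtm := s.2.1 + (if PySem.Chars.endswith move.toList ['2'] then 2 else 1)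
    let stm := s.2.2.1 +
      (if face ∈ ['M','E','S'] then 2 else if PySem.Chars.islower face then 1 else 1)
    let rot := s.2.2.2 + (if face ∈ ['X','Y','Z'] then 1 else 0)
    (htm, qtm, stm, rot)

def calculate_move_metrics (moves : List String) : List (String × Int) :=
  let m := moves.foldl cmmStep (0, 0, 0, 0)
  [("htm", m.1), ("qtm", m.2.1), ("stm", m.2.2.1), ("rotations", m.2.2.2)]

-- ===== PORT B =====
-- m[0].upper() guarded by non-emptiness (headD's default is unreachable under the guard)
def cmmFace (m : String) : Char := PySem.Chars.upperChar (m.toList.headD ' ')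

def calculate_move_metrics_alt (moves : List String) : List (String × Int) :=
  let htm : Int := moves.countP (fun m => !m.toList.isEmpty)
  let doubles : Int := moves.countP (fun m => PySem.Chars.endswith m.toList ['2'])
  let slices : Int := moves.countP (fun m => !m.toList.isEmpty && cmmFace m ∈ ['M','E','S'])
  let rotations : Int := moves.countP (fun m => !m.toList.isEmpty && cmmFace m ∈ ['X','Y','Z'])
  [("htm", htm), ("qtm", htm + doubles), ("stm", htm + slices), ("rotations", rotations)]

-- ===== PRECONDITION & SPEC =====
def Spec_calculate_move_metrics (moves : List String) (out : List (String × Int)) : Prop := out = calculate_move_metrics_alt moves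
instance (moves : List String) (out : List (String × Int)) : Decidable (Spec_calculate_move_metrics moves out) := by unfold Spec_calculate_move_metrics; infer_instance

-- ===== CLAIM (what is proved, stated in full; the proofs are below) =====
def Claim_equal_calculate_move_metrics : Prop := ∀ (moves : List String), Dom_calculate_move_metrics moves → Spec_calculate_move_metrics moves (calculate_move_metrics moves)

-- ===== LEMMAS AND PROOFS =====

-- A's fold from an arbitrary starting state equals that state plus B's four event counts,
-- combined with qtm = htm + doubles and stm = htm + slices
lemma cmm_fold (moves : List String) : ∀ (a b c d : Int),
    moves.foldl cmmStep (a, b, c, d) =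
      (a + (moves.countP (fun m => !m.toList.isEmpty) : Int),
       b + (moves.countP (fun m => !m.toList.isEmpty) : Int)
         + (moves.countP (fun m => PySem.Chars.endswith m.toList ['2']) : Int),
       c + (moves.countP (fun m => !m.toList.isEmpty) : Int)
         + (moves.countP (fun m => !m.toList.isEmpty && cmmFace m ∈ ['M','E','S']) : Int),
       d + (moves.countP (fun m => !m.toList.isEmpty && cmmFace m ∈ ['X','Y','Z']) : Int)) := by
  induction moves with
  | nil => simp
  | cons mv rest ih =>
    intro a b c d
    cases h : mv.toList with
    | nil =>
      simp [List.foldl_cons, cmmStep, h, ih, PySem.Chars.endswith]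
    | cons ch tl =>
      simp only [List.foldl_cons, cmmStep, h, ih, List.countP_cons, cmmFace,
        List.headD_cons, List.isEmpty_cons, Bool.not_false, Bool.true_and, Prod.mk.injEq]
      refine ⟨by push_cast; ring, ?_, ?_, ?_⟩ <;>
        (split_ifs <;> simp_all <;> push_cast <;> ring)

-- ===== VERDICT (by name: the statement is the Claim_ definition above) =====
theorem calculate_move_metrics_spec : Claim_equal_calculate_move_metrics := by
  intro moves _
  unfold Spec_calculate_move_metrics calculate_move_metrics calculate_move_metrics_alt
  rw [cmm_fold]
  simp
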